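-- pv_equiv track=rewrite | github.com/haolunc/ARC-RL | reference_solutions/solutions/50cb2852.py | transform
-- ===== SOURCE A (Python) =====
-- def transform(grid):
--
--     H = len(grid)
--     if H == 0:
--         return []
--     W = len(grid[0])
--
--     out = [row[:] for row in grid]
--
--     dirs = [(-1, 0), (1, 0), (0, -1), (0, 1)]
--
--     for r in range(H):
--         for c in range(W):
--             v = grid[r][c]
--             if v == 0:
--                 continue
--
--             interior = True
--             for dr, dc in dirs:
--                 nr, nc = r + dr, c + dc
--
--                 if not (0 <= nr < H and 0 <= nc < W):
--                     interior = False
--                     break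
--
--                 if grid[nr][nc] != v:
--                     interior = False
--                     break
--
--             if interior:
--                 out[r][c] = 8
--
--     return out
-- ===== SOURCE B (Python) =====
-- def transform(grid):
--     H = len(grid)
--     if H == 0:
--         return []
--     W = len(grid[0])
--
--     # edge-centered propagation: mark boundary cells instead of scanning
--     # each cell's whole neighborhood
--     boundary = [[False] * W for _ in range(H)]
--
--     for r in range(H):
--         for c in range(W):
--             if r == 0 or r == H - 1 or c == 0 or c == W - 1:
--                 boundary[r][c] = True
--
--     for r in range(H):
--         for c in range(W - 1):
--             if grid[r][c] != grid[r][c + 1]: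
--                 boundary[r][c] = True
--                 boundary[r][c + 1] = True
--
--     for r in range(H - 1):
--         for c in range(W):
--             if grid[r][c] != grid[r + 1][c]:
--                 boundary[r][c] = True
--                 boundary[r + 1][c] = True
--
--     out = [row[:] for row in grid]
--     for r in range(H):
--         for c in range(W):
--             if grid[r][c] != 0 and not boundary[r][c]:
--                 out[r][c] = 8
--     return out
-- ===== Notes on version B (the rewrite author's own statement) =====
-- stated objective: alternative
-- what changed: B replaces A's per-cell 4-neighbour scan (bounds checks and early break per cell) by edge-centered propagation: it marks a boolean boundary array from the grid border and from every differing horizontally/vertically adjacent pair, then sets 8 exactly at nonzero non-boundary cells.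
import Mathlib
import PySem

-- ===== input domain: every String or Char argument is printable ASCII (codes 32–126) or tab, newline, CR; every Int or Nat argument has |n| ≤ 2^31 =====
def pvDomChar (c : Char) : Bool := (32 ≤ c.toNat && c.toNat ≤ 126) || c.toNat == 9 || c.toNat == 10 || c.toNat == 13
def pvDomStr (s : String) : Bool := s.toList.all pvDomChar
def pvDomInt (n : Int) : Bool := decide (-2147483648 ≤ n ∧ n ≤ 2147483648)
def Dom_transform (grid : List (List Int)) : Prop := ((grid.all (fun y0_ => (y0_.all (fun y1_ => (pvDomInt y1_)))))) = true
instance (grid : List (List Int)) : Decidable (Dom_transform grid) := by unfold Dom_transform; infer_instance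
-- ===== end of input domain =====

-- B replaces A's per-cell 4-neighbour scan by edge-centered boundary marking over adjacent pairs (same cost, different decomposition).

-- shared 2-d indexing primitives (Python's grid[r][c] read and out[r][c] = v write)
def pvGet2 {α : Type} (d : α) (g : List (List α)) (r c : Nat) : α := (g.getD r []).getD c d
def pvSet2 {α : Type} (g : List (List α)) (r c : Nat) (v : α) : List (List α) :=
  g.set r ((g.getD r []).set c v)

-- ===== PORT A =====
def pvDirs : List (Int × Int) := [(-1, 0), (1, 0), (0, -1), (0, 1)]

-- A's `for dr, dc in dirs` loop with its two `break`s (false = broke out with interior = False)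
def pvCheckDirs (grid : List (List Int)) (H W : Nat) (v : Int) (r c : Nat) :
    List (Int × Int) → Bool
  | [] => true
  | (dr, dc) :: rest =>
      let nr : Int := (r : Int) + dr
      let nc : Int := (c : Int) + dc
      if ¬ (0 ≤ nr ∧ nr < (H : Int) ∧ 0 ≤ nc ∧ nc < (W : Int)) then false
      else if pvGet2 0 grid nr.toNat nc.toNat ≠ v then false
      else pvCheckDirs grid H W v r c rest

def transform (grid : List (List Int)) : List (List Int) :=
  let H := grid.length
  if H = 0 then []
  else
    let W := (grid.getD 0 []).length
    let out := grid.map (fun row => row)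
    (List.range H).foldl (fun out r =>
      (List.range W).foldl (fun out c =>
        let v := pvGet2 0 grid r c
        if v = 0 then out
        else if pvCheckDirs grid H W v r c pvDirs then pvSet2 out r c 8 else out) out) out

-- ===== PORT B =====
def transform_alt (grid : List (List Int)) : List (List Int) :=
  let H := grid.length
  if H = 0 then []
  else
    let W := (grid.getD 0 []).length
    let b0 : List (List Bool) := (List.range H).map (fun _ => (List.range W).map (fun _ => false))
    let b1 := (List.range H).foldl (fun b r =>
      (List.range W).foldl (fun b c =>
        if r = 0 ∨ r = H - 1 ∨ c = 0 ∨ c = W - 1 then pvSet2 b r c true else b) b) b0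
    let b2 := (List.range H).foldl (fun b r =>
      (List.range (W - 1)).foldl (fun b c =>
        if pvGet2 0 grid r c ≠ pvGet2 0 grid r (c + 1) then
          pvSet2 (pvSet2 b r c true) r (c + 1) true else b) b) b1
    let b3 := (List.range (H - 1)).foldl (fun b r =>
      (List.range W).foldl (fun b c =>
        if pvGet2 0 grid r c ≠ pvGet2 0 grid (r + 1) c then
          pvSet2 (pvSet2 b r c true) (r + 1) c true else b) b) b2
    let out := grid.map (fun row => row)
    (List.range H).foldl (fun out r =>
      (List.range W).foldl (fun out c =>
        if pvGet2 0 grid r c ≠ 0 ∧ pvGet2 false b3 r c = false then pvSet2 out r c 8 else out) out) out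

-- ===== PRECONDITION & SPEC =====
-- Pre_ excludes exactly the ragged grids on which A raises IndexError: some row shorter than the first row.
def Pre_transform (grid : List (List Int)) : Prop :=
  ∀ row ∈ grid, (grid.getD 0 []).length ≤ row.length
instance (grid : List (List Int)) : Decidable (Pre_transform grid) := by
  unfold Pre_transform; infer_instance

def pvWitness_transform : List (List Int) := [[1, 1, 1], [1, 1, 1], [1, 1, 1]]

def Spec_transform (grid : List (List Int)) (out : List (List Int)) : Prop := out = transform_alt grid
instance (grid : List (List Int)) (out : List (List Int)) : Decidable (Spec_transform grid out) := by unfold Spec_transform; infer_instance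

-- ===== CLAIM (what is proved, stated in full; the proofs are below) =====
def Claim_equal_transform : Prop := ∀ (grid : List (List Int)), Dom_transform grid → Pre_transform grid → Spec_transform grid (transform grid)

-- ===== LEMMAS AND PROOFS =====

def pvApply {α : Type} (g : List (List α)) (us : List (Nat × Nat × α)) : List (List α) :=
  us.foldl (fun g u => pvSet2 g u.1 u.2.1 u.2.2) g

theorem getD_set' {α : Type} (l : List α) (i j : Nat) (a d : α) :
    (l.set i a).getD j d = if i = j ∧ i < l.length then a else l.getD j d := by
  simp only [List.getD_eq_getElem?_getD, List.getElem?_set]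
  by_cases h : i = j
  · subst h
    by_cases hl : i < l.length <;> simp [hl]
  · simp [h]

theorem pvSet2_length {α : Type} (g : List (List α)) (r c : Nat) (v : α) :
    (pvSet2 g r c v).length = g.length := by simp [pvSet2]

theorem pvSet2_row_length {α : Type} (g : List (List α)) (r c i : Nat) (v : α) :
    ((pvSet2 g r c v).getD i []).length = (g.getD i []).length := by
  simp only [pvSet2, getD_set']
  split_ifs with h
  · obtain ⟨h1, h2⟩ := h; subst h1; simp
  · rfl

theorem pvGet2_set2 {α : Type} (d : α) (g : List (List α)) (r c i j : Nat) (v : α) :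
    pvGet2 d (pvSet2 g r c v) i j =
      if r = i ∧ c = j ∧ i < g.length ∧ j < (g.getD i []).length then v
      else pvGet2 d g i j := by
  simp only [pvGet2, pvSet2, getD_set', apply_ite (fun l : List α => l.getD j d)]
  by_cases hr : r = i
  · subst hr
    by_cases hc : c = j
    · subst hc
      split_ifs <;> first | rfl | omega
    · simp only [hc, false_and, and_false, if_false]
      split_ifs <;> first | rfl | tauto
  · simp [hr]

theorem pvApply_length {α : Type} (us : List (Nat × Nat × α)) (g : List (List α)) :
    (pvApply g us).length = g.length := by
  induction us generalizing g with
  | nil => rfl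
  | cons u us ih => simp only [pvApply, List.foldl_cons] at *; rw [ih, pvSet2_length]

theorem pvApply_row_length {α : Type} (us : List (Nat × Nat × α)) (g : List (List α)) (i : Nat) :
    ((pvApply g us).getD i []).length = (g.getD i []).length := by
  induction us generalizing g with
  | nil => rfl
  | cons u us ih => simp only [pvApply, List.foldl_cons] at *; rw [ih, pvSet2_row_length]

theorem pvApply_get {α : Type} (d v : α) (us : List (Nat × Nat × α))
    (hv : ∀ u ∈ us, u.2.2 = v) (g : List (List α)) (i j : Nat) :
    pvGet2 d (pvApply g us) i j =
      if (∃ u ∈ us, u.1 = i ∧ u.2.1 = j ∧ i < g.length ∧ j < (g.getD i []).length) then v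
      else pvGet2 d g i j := by
  induction us generalizing g with
  | nil => simp [pvApply]
  | cons u us ih =>
    have hval : u.2.2 = v := hv u (by simp)
    simp only [pvApply, List.foldl_cons] at *
    rw [ih (fun x hx => hv x (by simp [hx])) (pvSet2 g u.1 u.2.1 u.2.2)]
    simp only [pvSet2_length, pvSet2_row_length, pvGet2_set2]
    by_cases hex : ∃ x ∈ us, x.1 = i ∧ x.2.1 = j ∧ i < g.length ∧ j < (g.getD i []).length
    · rw [if_pos hex, if_pos]
      obtain ⟨x, hx, h⟩ := hex; exact ⟨x, by simp [hx], h⟩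
    · rw [if_neg hex]
      by_cases hu : u.1 = i ∧ u.2.1 = j ∧ i < g.length ∧ j < (g.getD i []).length
      · rw [if_pos hu, if_pos ⟨u, by simp, hu⟩, hval]
      · rw [if_neg hu, if_neg]
        rintro ⟨x, hx, h⟩
        rcases List.mem_cons.mp hx with rfl | hmem
        · exact hu h
        · exact hex ⟨x, hmem, h⟩

theorem foldl_pvApply {α β : Type} (L : List β) (ups : β → List (Nat × Nat × α))
    (g : List (List α)) :
    L.foldl (fun g x => pvApply g (ups x)) g = pvApply g (L.flatMap ups) := by
  induction L generalizing g with
  | nil => rfl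
  | cons x L ih => simp only [List.foldl_cons, List.flatMap_cons, pvApply, List.foldl_append]; exact ih _

def pvLA (grid : List (List Int)) : List (Nat × Nat × Int) :=
  (List.range grid.length).flatMap fun r =>
    (List.range (grid.getD 0 []).length).flatMap fun c =>
      if pvGet2 0 grid r c ≠ 0 ∧
          pvCheckDirs grid grid.length (grid.getD 0 []).length (pvGet2 0 grid r c) r c pvDirs = true
        then [(r, c, 8)] else []

theorem transform_eq (grid : List (List Int)) (h : ¬ grid.length = 0) :
    transform grid = pvApply grid (pvLA grid) := by
  unfold transform
  rw [if_neg h]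
  simp only [List.map_id']
  have hinner : ∀ r : Nat, (fun (out : List (List Int)) (c : Nat) =>
        let v := pvGet2 0 grid r c
        if v = 0 then out
        else if pvCheckDirs grid grid.length (grid.getD 0 []).length v r c pvDirs then
          pvSet2 out r c 8 else out) =
      (fun out c => pvApply out (if pvGet2 0 grid r c ≠ 0 ∧
          pvCheckDirs grid grid.length (grid.getD 0 []).length (pvGet2 0 grid r c) r c pvDirs = true
        then [(r, c, 8)] else [])) := by
    intro r; funext out c
    simp only []
    split_ifs with h0 h1 h2 h3 <;> first | rfl | tauto | simp_all [pvApply]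
  have houter : (fun (out : List (List Int)) (r : Nat) =>
      (List.range (grid.getD 0 []).length).foldl (fun out c =>
        let v := pvGet2 0 grid r c
        if v = 0 then out
        else if pvCheckDirs grid grid.length (grid.getD 0 []).length v r c pvDirs then
          pvSet2 out r c 8 else out) out) =
      (fun out r => pvApply out ((List.range (grid.getD 0 []).length).flatMap fun c =>
        if pvGet2 0 grid r c ≠ 0 ∧
            pvCheckDirs grid grid.length (grid.getD 0 []).length (pvGet2 0 grid r c) r c pvDirs = true
          then [(r, c, 8)] else [])) := by
    funext out r
    rw [hinner r, foldl_pvApply]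
  rw [houter, foldl_pvApply, pvLA]

def pvB0 (H W : Nat) : List (List Bool) := (List.range H).map (fun _ => (List.range W).map (fun _ => false))

def pvL1 (H W : Nat) : List (Nat × Nat × Bool) :=
  (List.range H).flatMap fun r => (List.range W).flatMap fun c =>
    if r = 0 ∨ r = H - 1 ∨ c = 0 ∨ c = W - 1 then [(r, c, true)] else []

def pvL2 (grid : List (List Int)) (H W : Nat) : List (Nat × Nat × Bool) :=
  (List.range H).flatMap fun r => (List.range (W - 1)).flatMap fun c =>
    if pvGet2 0 grid r c ≠ pvGet2 0 grid r (c + 1) then [(r, c, true), (r, c + 1, true)] else []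

def pvL3 (grid : List (List Int)) (H W : Nat) : List (Nat × Nat × Bool) :=
  (List.range (H - 1)).flatMap fun r => (List.range W).flatMap fun c =>
    if pvGet2 0 grid r c ≠ pvGet2 0 grid (r + 1) c then [(r, c, true), (r + 1, c, true)] else []

def pvB3 (grid : List (List Int)) : List (List Bool) :=
  pvApply (pvApply (pvApply (pvB0 grid.length (grid.getD 0 []).length)
    (pvL1 grid.length (grid.getD 0 []).length))
    (pvL2 grid grid.length (grid.getD 0 []).length))
    (pvL3 grid grid.length (grid.getD 0 []).length)

def pvLB (grid : List (List Int)) : List (Nat × Nat × Int) :=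
  (List.range grid.length).flatMap fun r =>
    (List.range (grid.getD 0 []).length).flatMap fun c =>
      if pvGet2 0 grid r c ≠ 0 ∧ pvGet2 false (pvB3 grid) r c = false then [(r, c, 8)] else []

theorem alt_eq (grid : List (List Int)) (h : ¬ grid.length = 0) :
    transform_alt grid = pvApply grid (pvLB grid) := by
  unfold transform_alt
  rw [if_neg h]
  simp only [List.map_id']
  have e1 : ∀ b0 : List (List Bool),
      (List.range grid.length).foldl (fun b r =>
        (List.range (grid.getD 0 []).length).foldl (fun b c =>
          if r = 0 ∨ r = grid.length - 1 ∨ c = 0 ∨ c = (grid.getD 0 []).length - 1 then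
            pvSet2 b r c true else b) b) b0
        = pvApply b0 (pvL1 grid.length (grid.getD 0 []).length) := by
    intro b0
    have hin : ∀ r : Nat, (fun (b : List (List Bool)) (c : Nat) =>
        if r = 0 ∨ r = grid.length - 1 ∨ c = 0 ∨ c = (grid.getD 0 []).length - 1 then
          pvSet2 b r c true else b) =
        (fun b c => pvApply b (if r = 0 ∨ r = grid.length - 1 ∨ c = 0 ∨ c = (grid.getD 0 []).length - 1 then
          [(r, c, true)] else [])) := by
      intro r; funext b c; split_ifs <;> simp [pvApply]
    have hout : (fun (b : List (List Bool)) (r : Nat) =>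
        (List.range (grid.getD 0 []).length).foldl (fun b c =>
          if r = 0 ∨ r = grid.length - 1 ∨ c = 0 ∨ c = (grid.getD 0 []).length - 1 then
            pvSet2 b r c true else b) b) =
        (fun b r => pvApply b ((List.range (grid.getD 0 []).length).flatMap fun c =>
          if r = 0 ∨ r = grid.length - 1 ∨ c = 0 ∨ c = (grid.getD 0 []).length - 1 then
            [(r, c, true)] else [])) := by
      funext b r; rw [hin r, foldl_pvApply]
    rw [hout, foldl_pvApply, pvL1]
  have e2 : ∀ b : List (List Bool),
      (List.range grid.length).foldl (fun b r =>
        (List.range ((grid.getD 0 []).length - 1)).foldl (fun b c =>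
          if pvGet2 0 grid r c ≠ pvGet2 0 grid r (c + 1) then
            pvSet2 (pvSet2 b r c true) r (c + 1) true else b) b) b
        = pvApply b (pvL2 grid grid.length (grid.getD 0 []).length) := by
    intro b0
    have hin : ∀ r : Nat, (fun (b : List (List Bool)) (c : Nat) =>
        if pvGet2 0 grid r c ≠ pvGet2 0 grid r (c + 1) then
          pvSet2 (pvSet2 b r c true) r (c + 1) true else b) =
        (fun b c => pvApply b (if pvGet2 0 grid r c ≠ pvGet2 0 grid r (c + 1) then
          [(r, c, true), (r, c + 1, true)] else [])) := by
      intro r; funext b c; split_ifs <;> simp [pvApply]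
    have hout : (fun (b : List (List Bool)) (r : Nat) =>
        (List.range ((grid.getD 0 []).length - 1)).foldl (fun b c =>
          if pvGet2 0 grid r c ≠ pvGet2 0 grid r (c + 1) then
            pvSet2 (pvSet2 b r c true) r (c + 1) true else b) b) =
        (fun b r => pvApply b ((List.range ((grid.getD 0 []).length - 1)).flatMap fun c =>
          if pvGet2 0 grid r c ≠ pvGet2 0 grid r (c + 1) then
            [(r, c, true), (r, c + 1, true)] else [])) := by
      funext b r; rw [hin r, foldl_pvApply]
    rw [hout, foldl_pvApply, pvL2]
  have e3 : ∀ b : List (List Bool),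
      (List.range (grid.length - 1)).foldl (fun b r =>
        (List.range (grid.getD 0 []).length).foldl (fun b c =>
          if pvGet2 0 grid r c ≠ pvGet2 0 grid (r + 1) c then
            pvSet2 (pvSet2 b r c true) (r + 1) c true else b) b) b
        = pvApply b (pvL3 grid grid.length (grid.getD 0 []).length) := by
    intro b0
    have hin : ∀ r : Nat, (fun (b : List (List Bool)) (c : Nat) =>
        if pvGet2 0 grid r c ≠ pvGet2 0 grid (r + 1) c then
          pvSet2 (pvSet2 b r c true) (r + 1) c true else b) =
        (fun b c => pvApply b (if pvGet2 0 grid r c ≠ pvGet2 0 grid (r + 1) c then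
          [(r, c, true), (r + 1, c, true)] else [])) := by
      intro r; funext b c; split_ifs <;> simp [pvApply]
    have hout : (fun (b : List (List Bool)) (r : Nat) =>
        (List.range (grid.getD 0 []).length).foldl (fun b c =>
          if pvGet2 0 grid r c ≠ pvGet2 0 grid (r + 1) c then
            pvSet2 (pvSet2 b r c true) (r + 1) c true else b) b) =
        (fun b r => pvApply b ((List.range (grid.getD 0 []).length).flatMap fun c =>
          if pvGet2 0 grid r c ≠ pvGet2 0 grid (r + 1) c then
            [(r, c, true), (r + 1, c, true)] else [])) := by
      funext b r; rw [hin r, foldl_pvApply]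
    rw [hout, foldl_pvApply, pvL3]
  rw [e1, e2, e3]
  have hb3 : pvApply (pvApply (pvApply ((List.range grid.length).map
        (fun _ => (List.range (grid.getD 0 []).length).map (fun _ => false)))
      (pvL1 grid.length (grid.getD 0 []).length))
      (pvL2 grid grid.length (grid.getD 0 []).length))
      (pvL3 grid grid.length (grid.getD 0 []).length) = pvB3 grid := rfl
  rw [hb3]
  have hin : ∀ r : Nat, (fun (out : List (List Int)) (c : Nat) =>
      if pvGet2 0 grid r c ≠ 0 ∧ pvGet2 false (pvB3 grid) r c = false then
        pvSet2 out r c 8 else out) =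
      (fun out c => pvApply out (if pvGet2 0 grid r c ≠ 0 ∧ pvGet2 false (pvB3 grid) r c = false then
        [(r, c, 8)] else [])) := by
    intro r; funext out c; split_ifs <;> simp [pvApply]
  have hout : (fun (out : List (List Int)) (r : Nat) =>
      (List.range (grid.getD 0 []).length).foldl (fun out c =>
        if pvGet2 0 grid r c ≠ 0 ∧ pvGet2 false (pvB3 grid) r c = false then
          pvSet2 out r c 8 else out) out) =
      (fun out r => pvApply out ((List.range (grid.getD 0 []).length).flatMap fun c =>
        if pvGet2 0 grid r c ≠ 0 ∧ pvGet2 false (pvB3 grid) r c = false then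
          [(r, c, 8)] else [])) := by
    funext out r; rw [hin r, foldl_pvApply]
  rw [hout, foldl_pvApply, pvLB]

theorem checkDirs_iff (grid : List (List Int)) (H W : Nat) (v : Int) (i j : Nat) :
    pvCheckDirs grid H W v i j pvDirs = true ↔
      (1 ≤ i ∧ i + 1 < H ∧ 1 ≤ j ∧ j + 1 < W ∧
        pvGet2 0 grid (i - 1) j = v ∧ pvGet2 0 grid (i + 1) j = v ∧
        pvGet2 0 grid i (j - 1) = v ∧ pvGet2 0 grid i (j + 1) = v) := by
  have t1 : ((i : Int) + -1).toNat = i - 1 := by omega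
  have t2 : ((i : Int) + 1).toNat = i + 1 := by omega
  have t3 : ((j : Int) + -1).toNat = j - 1 := by omega
  have t4 : ((j : Int) + 0).toNat = j := by omega
  have t5 : ((i : Int) + 0).toNat = i := by omega
  simp only [pvCheckDirs, pvDirs, t1, t2, t3, t4, t5]
  split_ifs <;> constructor <;> intro hh <;>
    first
    | omega
    | tauto
    | (exfalso; obtain ⟨c1, c2, c3, c4, e1, e2, e3, e4⟩ := hh; first | omega | tauto)
    | (refine ⟨by omega, by omega, by omega, by omega, ?_, ?_, ?_, ?_⟩ <;>
        first | tauto | (by_contra hne; tauto))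

theorem pvB0_length (H W : Nat) : (pvB0 H W).length = H := by simp [pvB0]

theorem pvB0_row_length (H W i : Nat) (hi : i < H) : ((pvB0 H W).getD i []).length = W := by
  simp [pvB0, List.getD_eq_getElem?_getD, List.getElem?_replicate, hi]

theorem pvB0_get (H W i j : Nat) : pvGet2 false (pvB0 H W) i j = false := by
  simp only [pvGet2, pvB0, List.map_const', List.getD_eq_getElem?_getD, List.getElem?_replicate]
  split_ifs <;> simp [List.getD_eq_getElem?_getD, List.getElem?_replicate] <;> split_ifs <;> simp

def pvBdry (grid : List (List Int)) (i j : Nat) : Prop :=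
  (i = 0 ∨ i = grid.length - 1 ∨ j = 0 ∨ j = (grid.getD 0 []).length - 1) ∨
  (j + 1 < (grid.getD 0 []).length ∧ pvGet2 0 grid i j ≠ pvGet2 0 grid i (j + 1)) ∨
  (1 ≤ j ∧ pvGet2 0 grid i (j - 1) ≠ pvGet2 0 grid i j) ∨
  (i + 1 < grid.length ∧ pvGet2 0 grid i j ≠ pvGet2 0 grid (i + 1) j) ∨
  (1 ≤ i ∧ pvGet2 0 grid (i - 1) j ≠ pvGet2 0 grid i j)

theorem hv1 (H W : Nat) : ∀ u ∈ pvL1 H W, u.2.2 = true := by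
  intro u hu
  simp only [pvL1, List.mem_flatMap, List.mem_range] at hu
  obtain ⟨r, hr, c, hc, hm⟩ := hu
  split at hm <;> simp_all

theorem hv2 (grid : List (List Int)) (H W : Nat) : ∀ u ∈ pvL2 grid H W, u.2.2 = true := by
  intro u hu
  simp only [pvL2, List.mem_flatMap, List.mem_range] at hu
  obtain ⟨r, hr, c, hc, hm⟩ := hu
  split at hm <;> simp_all
  rcases hm with h | h <;> subst h <;> rfl

theorem hv3 (grid : List (List Int)) (H W : Nat) : ∀ u ∈ pvL3 grid H W, u.2.2 = true := by
  intro u hu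
  simp only [pvL3, List.mem_flatMap, List.mem_range] at hu
  obtain ⟨r, hr, c, hc, hm⟩ := hu
  split at hm <;> simp_all
  rcases hm with h | h <;> subst h <;> rfl

theorem memL1_iff (H W i j : Nat) (hi : i < H) (hj : j < W) :
    (∃ u ∈ pvL1 H W, u.1 = i ∧ u.2.1 = j ∧ i < H ∧ j < W) ↔
      (i = 0 ∨ i = H - 1 ∨ j = 0 ∨ j = W - 1) := by
  constructor
  · rintro ⟨u, hu, h1, h2, -⟩
    simp only [pvL1, List.mem_flatMap, List.mem_range] at hu
    obtain ⟨r, hr, c, hc, hm⟩ := hu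
    split_ifs at hm with hcond
    · simp only [List.mem_singleton] at hm
      subst hm; simp only at h1 h2; subst h1; subst h2; exact hcond
    · simp at hm
  · intro hcond
    refine ⟨(i, j, true), ?_, rfl, rfl, hi, hj⟩
    simp only [pvL1, List.mem_flatMap, List.mem_range]
    exact ⟨i, hi, j, hj, by rw [if_pos hcond]; simp⟩

theorem memL2_iff (grid : List (List Int)) (H W i j : Nat) (hi : i < H) (hj : j < W) :
    (∃ u ∈ pvL2 grid H W, u.1 = i ∧ u.2.1 = j ∧ i < H ∧ j < W) ↔
      ((j + 1 < W ∧ pvGet2 0 grid i j ≠ pvGet2 0 grid i (j + 1)) ∨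
       (1 ≤ j ∧ pvGet2 0 grid i (j - 1) ≠ pvGet2 0 grid i j)) := by
  constructor
  · rintro ⟨u, hu, h1, h2, -⟩
    simp only [pvL2, List.mem_flatMap, List.mem_range] at hu
    obtain ⟨r, hr, c, hc, hm⟩ := hu
    split_ifs at hm with hcond
    · simp only [List.mem_cons, List.mem_singleton, List.not_mem_nil, or_false] at hm
      rcases hm with rfl | rfl
      · simp only at h1 h2; subst h1; subst h2
        exact Or.inl ⟨by omega, hcond⟩
      · simp only at h1 h2; subst h1; subst h2
        refine Or.inr ⟨by omega, ?_⟩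
        simpa using hcond
    · simp at hm
  · rintro (⟨hw, hne⟩ | ⟨hj1, hne⟩)
    · refine ⟨(i, j, true), ?_, rfl, rfl, hi, hj⟩
      simp only [pvL2, List.mem_flatMap, List.mem_range]
      exact ⟨i, hi, j, by omega, by rw [if_pos hne]; simp⟩
    · refine ⟨(i, j, true), ?_, rfl, rfl, hi, hj⟩
      simp only [pvL2, List.mem_flatMap, List.mem_range]
      refine ⟨i, hi, j - 1, by omega, ?_⟩
      rw [if_pos (by rw [Nat.sub_add_cancel hj1]; exact hne)]
      rw [Nat.sub_add_cancel hj1]; simp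

theorem memL3_iff (grid : List (List Int)) (H W i j : Nat) (hi : i < H) (hj : j < W) :
    (∃ u ∈ pvL3 grid H W, u.1 = i ∧ u.2.1 = j ∧ i < H ∧ j < W) ↔
      ((i + 1 < H ∧ pvGet2 0 grid i j ≠ pvGet2 0 grid (i + 1) j) ∨
       (1 ≤ i ∧ pvGet2 0 grid (i - 1) j ≠ pvGet2 0 grid i j)) := by
  constructor
  · rintro ⟨u, hu, h1, h2, -⟩
    simp only [pvL3, List.mem_flatMap, List.mem_range] at hu
    obtain ⟨r, hr, c, hc, hm⟩ := hu
    split_ifs at hm with hcond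
    · simp only [List.mem_cons, List.mem_singleton, List.not_mem_nil, or_false] at hm
      rcases hm with rfl | rfl
      · simp only at h1 h2; subst h1; subst h2
        exact Or.inl ⟨by omega, hcond⟩
      · simp only at h1 h2; subst h1; subst h2
        refine Or.inr ⟨by omega, ?_⟩
        simpa using hcond
    · simp at hm
  · rintro (⟨hw, hne⟩ | ⟨hi1, hne⟩)
    · refine ⟨(i, j, true), ?_, rfl, rfl, hi, hj⟩
      simp only [pvL3, List.mem_flatMap, List.mem_range]
      exact ⟨i, by omega, j, hj, by rw [if_pos hne]; simp⟩
    · refine ⟨(i, j, true), ?_, rfl, rfl, hi, hj⟩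
      simp only [pvL3, List.mem_flatMap, List.mem_range]
      refine ⟨i - 1, by omega, j, hj, ?_⟩
      rw [if_pos (by rw [Nat.sub_add_cancel hi1]; exact hne)]
      rw [Nat.sub_add_cancel hi1]; simp

theorem pvB3_get (grid : List (List Int)) (i j : Nat)
    (hi : i < grid.length) (hj : j < (grid.getD 0 []).length) :
    (pvGet2 false (pvB3 grid) i j = false) ↔ ¬ pvBdry grid i j := by
  unfold pvB3
  rw [pvApply_get false true _ (hv3 grid grid.length (grid.getD 0 []).length),
      pvApply_get false true _ (hv2 grid grid.length (grid.getD 0 []).length),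
      pvApply_get false true _ (hv1 grid.length (grid.getD 0 []).length),
      pvB0_get]
  simp only [pvApply_length, pvApply_row_length, pvB0_length,
    pvB0_row_length grid.length (grid.getD 0 []).length i hi]
  split_ifs with h3 h2 h1
  · simp only [Bool.true_eq_false, false_iff, not_not]
    rw [memL3_iff grid grid.length (grid.getD 0 []).length i j hi hj] at h3
    unfold pvBdry; tauto
  · simp only [Bool.true_eq_false, false_iff, not_not]
    rw [memL2_iff grid grid.length (grid.getD 0 []).length i j hi hj] at h2
    unfold pvBdry; tauto
  · simp only [Bool.true_eq_false, false_iff, not_not]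
    rw [memL1_iff grid.length (grid.getD 0 []).length i j hi hj] at h1
    unfold pvBdry; tauto
  · simp only [eq_self_iff_true, true_iff]
    rw [memL3_iff grid grid.length (grid.getD 0 []).length i j hi hj] at h3
    rw [memL2_iff grid grid.length (grid.getD 0 []).length i j hi hj] at h2
    rw [memL1_iff grid.length (grid.getD 0 []).length i j hi hj] at h1
    unfold pvBdry; tauto

theorem key_iff (grid : List (List Int)) (i j : Nat)
    (hi : i < grid.length) (hj : j < (grid.getD 0 []).length) :
    pvCheckDirs grid grid.length (grid.getD 0 []).length (pvGet2 0 grid i j) i j pvDirs = true ↔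
      pvGet2 false (pvB3 grid) i j = false := by
  rw [checkDirs_iff, pvB3_get grid i j hi hj]
  unfold pvBdry
  constructor
  · rintro ⟨c1, c2, c3, c4, e1, e2, e3, e4⟩
    rintro (hb | hb | hb | hb | hb)
    · omega
    · exact hb.2 e4.symm
    · exact hb.2 e3
    · exact hb.2 e2.symm
    · exact hb.2 e1
  · intro hnb
    have h1 : ¬(i = 0 ∨ i = grid.length - 1 ∨ j = 0 ∨ j = (grid.getD 0 []).length - 1) :=
      fun h => hnb (Or.inl h)
    have h2 : ¬(j + 1 < (grid.getD 0 []).length ∧ pvGet2 0 grid i j ≠ pvGet2 0 grid i (j + 1)) :=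
      fun h => hnb (Or.inr (Or.inl h))
    have h3 : ¬(1 ≤ j ∧ pvGet2 0 grid i (j - 1) ≠ pvGet2 0 grid i j) :=
      fun h => hnb (Or.inr (Or.inr (Or.inl h)))
    have h4 : ¬(i + 1 < grid.length ∧ pvGet2 0 grid i j ≠ pvGet2 0 grid (i + 1) j) :=
      fun h => hnb (Or.inr (Or.inr (Or.inr (Or.inl h))))
    have h5 : ¬(1 ≤ i ∧ pvGet2 0 grid (i - 1) j ≠ pvGet2 0 grid i j) :=
      fun h => hnb (Or.inr (Or.inr (Or.inr (Or.inr h))))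
    refine ⟨by omega, by omega, by omega, by omega, ?_, ?_, ?_, ?_⟩
    · by_contra hne; exact h5 ⟨by omega, hne⟩
    · by_contra hne; exact h4 ⟨by omega, fun e => hne e.symm⟩
    · by_contra hne; exact h3 ⟨by omega, hne⟩
    · by_contra hne; exact h2 ⟨by omega, fun e => hne e.symm⟩

theorem hvA (grid : List (List Int)) : ∀ u ∈ pvLA grid, u.2.2 = (8 : Int) := by
  intro u hu
  simp only [pvLA, List.mem_flatMap, List.mem_range] at hu
  obtain ⟨r, hr, c, hc, hm⟩ := hu
  split at hm <;> simp_all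

theorem hvB (grid : List (List Int)) : ∀ u ∈ pvLB grid, u.2.2 = (8 : Int) := by
  intro u hu
  simp only [pvLB, List.mem_flatMap, List.mem_range] at hu
  obtain ⟨r, hr, c, hc, hm⟩ := hu
  split at hm <;> simp_all

theorem rowlen_ge (grid : List (List Int)) (hPre : Pre_transform grid) (i : Nat)
    (hi : i < grid.length) : (grid.getD 0 []).length ≤ (grid.getD i []).length := by
  apply hPre
  rw [List.getD_eq_getElem grid [] hi]
  exact List.getElem_mem hi

theorem memLA_iff (grid : List (List Int)) (hPre : Pre_transform grid) (i j : Nat) :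
    (∃ u ∈ pvLA grid, u.1 = i ∧ u.2.1 = j ∧ i < grid.length ∧ j < (grid.getD i []).length) ↔
      (i < grid.length ∧ j < (grid.getD 0 []).length ∧ pvGet2 0 grid i j ≠ 0 ∧
        pvCheckDirs grid grid.length (grid.getD 0 []).length (pvGet2 0 grid i j) i j pvDirs
          = true) := by
  constructor
  · rintro ⟨u, hu, h1, h2, -, -⟩
    simp only [pvLA, List.mem_flatMap, List.mem_range] at hu
    obtain ⟨r, hr, c, hc, hm⟩ := hu
    split_ifs at hm with hcond
    · simp only [List.mem_singleton] at hm
      subst hm; simp only at h1 h2; subst h1; subst h2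
      exact ⟨hr, hc, hcond⟩
    · simp at hm
  · rintro ⟨hi, hj, hcond⟩
    refine ⟨(i, j, 8), ?_, rfl, rfl, hi, lt_of_lt_of_le hj (rowlen_ge grid hPre i hi)⟩
    simp only [pvLA, List.mem_flatMap, List.mem_range]
    exact ⟨i, hi, j, hj, by rw [if_pos hcond]; simp⟩

theorem memLB_iff (grid : List (List Int)) (hPre : Pre_transform grid) (i j : Nat) :
    (∃ u ∈ pvLB grid, u.1 = i ∧ u.2.1 = j ∧ i < grid.length ∧ j < (grid.getD i []).length) ↔
      (i < grid.length ∧ j < (grid.getD 0 []).length ∧ pvGet2 0 grid i j ≠ 0 ∧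
        pvGet2 false (pvB3 grid) i j = false) := by
  constructor
  · rintro ⟨u, hu, h1, h2, -, -⟩
    simp only [pvLB, List.mem_flatMap, List.mem_range] at hu
    obtain ⟨r, hr, c, hc, hm⟩ := hu
    split_ifs at hm with hcond
    · simp only [List.mem_singleton] at hm
      subst hm; simp only at h1 h2; subst h1; subst h2
      exact ⟨hr, hc, hcond⟩
    · simp at hm
  · rintro ⟨hi, hj, hcond⟩
    refine ⟨(i, j, 8), ?_, rfl, rfl, hi, lt_of_lt_of_le hj (rowlen_ge grid hPre i hi)⟩
    simp only [pvLB, List.mem_flatMap, List.mem_range]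
    exact ⟨i, hi, j, hj, by rw [if_pos hcond]; simp⟩

theorem grid_ext {α : Type} (d : α) (g1 g2 : List (List α)) (hl : g1.length = g2.length)
    (hrl : ∀ i, (g1.getD i []).length = (g2.getD i []).length)
    (h : ∀ i j, pvGet2 d g1 i j = pvGet2 d g2 i j) : g1 = g2 := by
  apply List.ext_getElem hl
  intro i h1 h2
  apply List.ext_getElem
  · have := hrl i
    rwa [List.getD_eq_getElem g1 [] h1, List.getD_eq_getElem g2 [] h2] at this
  · intro j hj1 hj2
    have := h i j
    rwa [pvGet2, pvGet2, List.getD_eq_getElem g1 [] h1, List.getD_eq_getElem g2 [] h2,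
      List.getD_eq_getElem _ d hj1, List.getD_eq_getElem _ d hj2] at this

theorem main_eq (grid : List (List Int)) (hPre : Pre_transform grid) :
    transform grid = transform_alt grid := by
  by_cases h : grid.length = 0
  · unfold transform transform_alt
    rw [if_pos h, if_pos h]
  · rw [transform_eq grid h, alt_eq grid h]
    apply grid_ext (0 : Int)
    · rw [pvApply_length, pvApply_length]
    · intro i; rw [pvApply_row_length, pvApply_row_length]
    · intro i j
      rw [pvApply_get 0 8 _ (hvA grid), pvApply_get 0 8 _ (hvB grid)]
      rw [if_congr (Iff.trans (memLA_iff grid hPre i j)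
            (Iff.trans ?_ (memLB_iff grid hPre i j).symm)) rfl rfl]
      by_cases hi : i < grid.length
      · by_cases hj : j < (grid.getD 0 []).length
        · have := key_iff grid i j hi hj
          tauto
        · tauto
      · tauto


-- ===== VERDICT (by name: the statement is the Claim_ definition above) =====
theorem transform_spec : Claim_equal_transform := by
  intro grid _ hPre
  unfold Spec_transform
  exact main_eq grid hPre
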